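-- pv_equiv track=rewrite | github.com/zaidsaeed/Personal-Projects | Extensive 2-D list practice.py | v_check_1
-- ===== SOURCE A (Python) =====
-- def v_check_1(m): #checks from top to bottom
--     '''(2D List) --> 1Dlist/ 2D list
--     This function takes in a matrix as input
--     and returns the position of four numbers if there is an
--     arithmetic progression in any of the matrix's columns.
--     If no arithmetic progression is detected horizontally, then
--     the inputted list is returned for further examinning.'''
--     if len(m) < 5:
--         return m
--     l = []
--     row = len(m)
--     column = len(m[0])
--     for i in range(0,column):
--         for j in range(0,row-4):
--             s1 = m[j][i] - m[j+1][i]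
--             s2 = m[j+1][i] - m[j+2][i]
--             s3 = m[j+2][i] - m[j+3][i]
--             s4 = m[j+3][i] - m[j+4][i]
--             if s1 == s2 == s3 == s4:
--                 for s in range(0,4):
--                     l.append([s+j, m[s+j].index(m[s+j][i])])
--                 return l
--     return m
-- ===== SOURCE B (Python) =====
-- def v_check_1(m):
--     if len(m) < 5:
--         return m
--     for i in range(len(m[0])):
--         col = [row[i] for row in m]
--         diffs = [col[k] - col[k + 1] for k in range(len(col) - 1)]
--         j = 0
--         while j < len(diffs):
--             k = j + 1
--             while k < len(diffs) and diffs[k] == diffs[j]: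
--                 k += 1
--             if k - j >= 4:
--                 return [[s + j, m[s + j].index(col[s + j])] for s in range(4)]
--             j = k
--     return m
-- ===== Notes on version B (the rewrite author's own statement) =====
-- stated objective: alternative
-- what changed: B extracts each column and its difference list explicitly, then run-length-scans the difference list (skipping whole runs of equal differences) instead of A's sliding four-difference window over matrix indices.
-- outside the precondition, e.g. on v_check_1([[1], [2], [3], [4], [5], []]): A returns [[0, 0], [1, 0], [2, 0], [3, 0]], B raises IndexError
import Mathlib
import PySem

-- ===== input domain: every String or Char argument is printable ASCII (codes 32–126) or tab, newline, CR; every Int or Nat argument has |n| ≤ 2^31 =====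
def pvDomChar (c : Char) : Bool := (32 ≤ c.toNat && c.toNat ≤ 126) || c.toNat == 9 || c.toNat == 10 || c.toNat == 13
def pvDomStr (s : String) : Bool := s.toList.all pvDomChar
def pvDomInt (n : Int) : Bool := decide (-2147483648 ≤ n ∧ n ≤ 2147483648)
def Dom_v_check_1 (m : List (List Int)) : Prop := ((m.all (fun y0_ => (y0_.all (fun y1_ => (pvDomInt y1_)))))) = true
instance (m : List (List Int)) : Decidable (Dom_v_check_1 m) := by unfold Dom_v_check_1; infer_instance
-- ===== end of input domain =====

-- B extracts each column and its difference list explicitly, then run-length-scans the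
-- difference list (skipping whole runs of equal differences) instead of A's sliding
-- four-difference window over matrix indices (alternative decomposition).


-- ===== PORT A =====
-- m[j][i]: exact under Pre_ (all indices in range); getD defaults are unreachable there
def pvAIdx (m : List (List Int)) (j i : Nat) : Int := (m.getD j []).getD i 0

-- the inner 'for s in range(0,4): l.append([s+j, m[s+j].index(m[s+j][i])])'
def pvAOut (m : List (List Int)) (i j : Nat) : List (List Int) :=
  (List.range 4).map (fun s =>
    [((s + j : Nat) : Int),
     (((PySem.List.index? (m.getD (s + j) []) (pvAIdx m (s + j) i)).getD 0 : Nat) : Int)])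

-- the inner 'for j in range(0,row-4)' with its early return
def pvAScanJ (m : List (List Int)) (i : Nat) : List Nat → Option (List (List Int))
  | [] => none
  | j :: js =>
    let s1 := pvAIdx m j i - pvAIdx m (j+1) i
    let s2 := pvAIdx m (j+1) i - pvAIdx m (j+2) i
    let s3 := pvAIdx m (j+2) i - pvAIdx m (j+3) i
    let s4 := pvAIdx m (j+3) i - pvAIdx m (j+4) i
    if s1 = s2 ∧ s2 = s3 ∧ s3 = s4 then some (pvAOut m i j) else pvAScanJ m i js

-- the outer 'for i in range(0,column)'
def pvAScanI (m : List (List Int)) (row : Nat) : List Nat → Option (List (List Int))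
  | [] => none
  | i :: is =>
    match pvAScanJ m i (List.range (row - 4)) with
    | some l => some l
    | none => pvAScanI m row is

def v_check_1 (m : List (List Int)) : List (List Int) :=
  if m.length < 5 then m
  else
    match pvAScanI m m.length (List.range (m.getD 0 []).length) with
    | some l => l
    | none => m

-- ===== PORT B =====
-- col = [row[i] for row in m]  (row[i] exact under Pre_)
def pvColB (m : List (List Int)) (i : Nat) : List Int :=
  m.map (fun row => row.getD i 0)

-- diffs = [col[k] - col[k+1] for k in range(len(col) - 1)]
def pvDiffsB (col : List Int) : List Int :=
  (List.range (col.length - 1)).map (fun k => col.getD k 0 - col.getD (k+1) 0)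

-- the inner 'k = j + 1; while k < len(diffs) and diffs[k] == diffs[j]: k += 1':
-- returns (k - j - 1, diffs[k:]) computed on the tail after position j
def pvTakeRun (d : Int) : List Int → Nat × List Int
  | [] => (0, [])
  | x :: xs => if x = d then ((pvTakeRun d xs).1 + 1, (pvTakeRun d xs).2) else (0, x :: xs)

theorem pvTakeRun_len (d : Int) (l : List Int) : (pvTakeRun d l).2.length ≤ l.length := by
  induction l with
  | nil => simp [pvTakeRun]
  | cons x xs ih =>
    simp only [pvTakeRun]
    split_ifs
    · exact Nat.le_succ_of_le ih
    · simp

-- the outer 'while j < len(diffs): … if k - j >= 4: return …; j = k' as a recursion on diffs[j:]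
def pvFindRun : List Int → Nat → Option Nat
  | [], _ => none
  | x :: xs, j =>
    if 4 ≤ (pvTakeRun x xs).1 + 1 then some j
    else pvFindRun (pvTakeRun x xs).2 (j + (pvTakeRun x xs).1 + 1)
termination_by l _ => l.length
decreasing_by
  exact Nat.lt_succ_of_le (pvTakeRun_len x xs)

-- '[[s + j, m[s + j].index(col[s + j])] for s in range(4)]'
def pvOutB (m : List (List Int)) (col : List Int) (j : Nat) : List (List Int) :=
  (List.range 4).map (fun s =>
    [((s + j : Nat) : Int),
     (((PySem.List.index? (m.getD (s + j) []) (col.getD (s + j) 0)).getD 0 : Nat) : Int)])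

-- the outer 'for i in range(len(m[0]))'
def pvColsB (m : List (List Int)) : List Nat → Option (List (List Int))
  | [] => none
  | i :: is =>
    let col := pvColB m i
    match pvFindRun (pvDiffsB col) 0 with
    | some j => some (pvOutB m col j)
    | none => pvColsB m is

def v_check_1_alt (m : List (List Int)) : List (List Int) :=
  if m.length < 5 then m
  else
    match pvColsB m (List.range (m.headD []).length) with
    | some l => l
    | none => m

-- ===== PRECONDITION & SPEC =====
-- Pre_ excludes ragged matrices (some row shorter than row 0) when len(m) >= 5: on almost all of
-- them A raises IndexError reading a short row; on the few where a progression is found before the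
-- short row is reached A returns but B raises IndexError building the column (see cites).
def Pre_v_check_1 (m : List (List Int)) : Prop :=
  m.length < 5 ∨ ∀ r ∈ m, (m.headD []).length ≤ r.length
instance (m : List (List Int)) : Decidable (Pre_v_check_1 m) := by unfold Pre_v_check_1; infer_instance

def pvWitness_v_check_1 : List (List Int) := [[1], [2], [4], [8], [16]]

def Spec_v_check_1 (m : List (List Int)) (out : List (List Int)) : Prop := out = v_check_1_alt m
instance (m : List (List Int)) (out : List (List Int)) : Decidable (Spec_v_check_1 m out) := by unfold Spec_v_check_1; infer_instance

-- ===== CLAIM (what is proved, stated in full; the proofs are below) =====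
def Claim_equal_v_check_1 : Prop := ∀ (m : List (List Int)), Dom_v_check_1 m → Pre_v_check_1 m → Spec_v_check_1 m (v_check_1 m)

-- ===== LEMMAS AND PROOFS =====

-- the window predicate on a difference list: four consecutive equal entries starting at j
def pvWin (ds : List Int) (j : Nat) : Bool :=
  decide (ds.getD j 0 = ds.getD (j+1) 0 ∧ ds.getD (j+1) 0 = ds.getD (j+2) 0 ∧
          ds.getD (j+2) 0 = ds.getD (j+3) 0)

theorem pvFind_congr {α : Type} (p q : α → Bool) :
    ∀ (l : List α), (∀ x ∈ l, p x = q x) → l.find? p = l.find? q := by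
  intro l
  induction l with
  | nil => intro _; rfl
  | cons x xs ih =>
    intro h
    simp only [List.find?_cons, h x (List.mem_cons_self)]
    cases q x
    · exact ih (fun y hy => h y (List.mem_cons_of_mem x hy))
    · rfl

theorem pvFind_range'_none (p : Nat → Bool) :
    ∀ (len a : Nat), (∀ t, a ≤ t → t < a + len → p t = false) →
      (List.range' a len).find? p = none := by
  intro len
  induction len with
  | zero => intro a _; rfl
  | succ n ih =>
    intro a h
    simp only [List.range'_succ, List.find?_cons]
    have ha : p a = false := h a le_rfl (by omega)
    rw [ha]
    exact ih (a+1) (fun t h1 h2 => h t (by omega) (by omega))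

theorem pvFind_range'_some (p : Nat → Bool) :
    ∀ (len a j : Nat), a ≤ j → j < a + len → p j = true →
      (∀ t, a ≤ t → t < j → p t = false) →
      (List.range' a len).find? p = some j := by
  intro len
  induction len with
  | zero => intro a j h1 h2; omega
  | succ n ih =>
    intro a j h1 h2 hp hmin
    simp only [List.range'_succ, List.find?_cons]
    by_cases ha : a = j
    · subst ha; rw [hp]
    · have haf : p a = false := hmin a le_rfl (by omega)
      rw [haf]
      exact ih (a+1) j (by omega) (by omega) hp (fun t ht1 ht2 => hmin t (by omega) ht2)

theorem pvTakeRun_drop (d : Int) (l : List Int) : l.drop (pvTakeRun d l).1 = (pvTakeRun d l).2 := by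
  induction l with
  | nil => simp [pvTakeRun]
  | cons x xs ih =>
    simp only [pvTakeRun]
    split_ifs
    · simpa using ih
    · simp

theorem pvTakeRun_le (d : Int) (l : List Int) : (pvTakeRun d l).1 ≤ l.length := by
  induction l with
  | nil => simp [pvTakeRun]
  | cons x xs ih =>
    simp only [pvTakeRun]
    split_ifs
    · simpa using ih
    · simp

theorem pvTakeRun_run (d : Int) (l : List Int) :
    ∀ t, t < (pvTakeRun d l).1 → l.getD t 0 = d := by
  induction l with
  | nil => simp [pvTakeRun]
  | cons x xs ih =>
    intro t ht
    simp only [pvTakeRun] at ht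
    by_cases hx : x = d
    · rw [if_pos hx] at ht
      cases t with
      | zero => simpa using hx
      | succ t' =>
        simp only [List.getD_cons_succ]
        exact ih t' (by omega)
    · rw [if_neg hx] at ht; omega

theorem pvTakeRun_stop (d : Int) (l : List Int) :
    (pvTakeRun d l).2 = [] ∨ l.getD (pvTakeRun d l).1 0 ≠ d := by
  induction l with
  | nil => left; simp [pvTakeRun]
  | cons x xs ih =>
    simp only [pvTakeRun]
    by_cases hx : x = d
    · rw [if_pos hx]
      rcases ih with h | h
      · left; simpa using h
      · right; simpa using h
    · right; rw [if_neg hx]; simpa using hx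

theorem pvGetD_drop (l : List Int) (a t : Nat) : (l.drop a).getD t 0 = l.getD (a + t) 0 := by
  simp [List.getD_eq_getElem?_getD, List.getElem?_drop]

-- main invariant of B's run-skipping scan: starting at j with no in-range window before j
-- and a run boundary at j, it finds exactly the first in-range window of the whole list
theorem pvFindRun_find (ds : List Int) :
    ∀ (fuel j : Nat), ds.length ≤ j + fuel →
      (∀ t, t < j → t + 3 < ds.length → pvWin ds t = false) →
      (j = 0 ∨ ds.length ≤ j ∨ ds.getD (j-1) 0 ≠ ds.getD j 0) →
      pvFindRun (ds.drop j) j = (List.range' 0 (ds.length - 3)).find? (pvWin ds) := by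
  intro fuel
  induction fuel with
  | zero =>
    intro j hfuel hnw _
    have hd : ds.drop j = [] := List.drop_eq_nil_of_le (by omega)
    rw [hd, pvFindRun]
    exact (pvFind_range'_none (pvWin ds) (ds.length - 3) 0
      (fun t _ ht => hnw t (by omega) (by omega))).symm
  | succ nf ih =>
    intro j hfuel hnw hbd
    by_cases hj : ds.length ≤ j
    · have hd : ds.drop j = [] := List.drop_eq_nil_of_le hj
      rw [hd, pvFindRun]
      exact (pvFind_range'_none (pvWin ds) (ds.length - 3) 0
        (fun t _ ht => hnw t (by omega) (by omega))).symm
    · have hj' : j < ds.length := by omega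
      have hcons : ds.drop j = ds.getD j 0 :: ds.drop (j+1) := by
        rw [List.getD_eq_getElem ds 0 hj']
        exact (List.getElem_cons_drop hj').symm
      have hrun : ∀ t, t ≤ (pvTakeRun (ds.getD j 0) (ds.drop (j+1))).1 →
          ds.getD (j+t) 0 = ds.getD j 0 := by
        intro t ht
        cases t with
        | zero => rfl
        | succ t' =>
          have h1 : (ds.drop (j+1)).getD t' 0 = ds.getD j 0 :=
            pvTakeRun_run (ds.getD j 0) (ds.drop (j+1)) t' (by omega)
          have h2 : (ds.drop (j+1)).getD t' 0 = ds.getD (j+1+t') 0 := pvGetD_drop ds (j+1) t'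
          rw [show j + (t'+1) = j+1+t' by omega, ← h2, h1]
      have hrest : (pvTakeRun (ds.getD j 0) (ds.drop (j+1))).2 =
          ds.drop (j + (pvTakeRun (ds.getD j 0) (ds.drop (j+1))).1 + 1) := by
        rw [← pvTakeRun_drop (ds.getD j 0) (ds.drop (j+1)), List.drop_drop]
        congr 1
        omega
      have hnle : (pvTakeRun (ds.getD j 0) (ds.drop (j+1))).1 ≤ ds.length - (j+1) := by
        have := pvTakeRun_le (ds.getD j 0) (ds.drop (j+1))
        simpa using this
      have hstop : ds.length ≤ j + (pvTakeRun (ds.getD j 0) (ds.drop (j+1))).1 + 1 ∨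
          ds.getD (j + (pvTakeRun (ds.getD j 0) (ds.drop (j+1))).1 + 1) 0 ≠ ds.getD j 0 := by
        rcases pvTakeRun_stop (ds.getD j 0) (ds.drop (j+1)) with h | h
        · left
          rw [hrest] at h
          have := List.drop_eq_nil_iff.mp h
          omega
        · right
          have h2 : (ds.drop (j+1)).getD (pvTakeRun (ds.getD j 0) (ds.drop (j+1))).1 0 =
              ds.getD (j+1+(pvTakeRun (ds.getD j 0) (ds.drop (j+1))).1) 0 :=
            pvGetD_drop ds (j+1) _
          rw [show j + (pvTakeRun (ds.getD j 0) (ds.drop (j+1))).1 + 1 =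
              j+1+(pvTakeRun (ds.getD j 0) (ds.drop (j+1))).1 by omega, ← h2]
          exact h
      rw [hcons, pvFindRun]
      by_cases h4 : 4 ≤ (pvTakeRun (ds.getD j 0) (ds.drop (j+1))).1 + 1
      · rw [if_pos h4]
        have hjlt : j < ds.length - 3 := by omega
        have hwj : pvWin ds j = true := by
          have e1 := hrun 1 (by omega)
          have e2 := hrun 2 (by omega)
          have e3 := hrun 3 (by omega)
          simp only [pvWin, decide_eq_true_eq]
          exact ⟨by rw [e1], by rw [e1, e2], by rw [e2, e3]⟩
        exact (pvFind_range'_some (pvWin ds) (ds.length - 3) 0 j (by omega) (by omega) hwj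
          (fun t _ ht => hnw t ht (by omega))).symm
      · rw [if_neg h4]
        have hn2 : (pvTakeRun (ds.getD j 0) (ds.drop (j+1))).1 ≤ 2 := by omega
        have hnw' : ∀ t, t < j + (pvTakeRun (ds.getD j 0) (ds.drop (j+1))).1 + 1 →
            t + 3 < ds.length → pvWin ds t = false := by
          intro t ht hlen
          by_cases htj : t < j
          · exact hnw t htj hlen
          · -- t ∈ [j, j+n]: the window crosses the run boundary (j+n, j+n+1)
            simp only [pvWin, decide_eq_false_iff_not]
            intro ⟨w1, w2, w3⟩
            have hpad : ds.getD (j + (pvTakeRun (ds.getD j 0) (ds.drop (j+1))).1) 0 =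
                ds.getD (j + (pvTakeRun (ds.getD j 0) (ds.drop (j+1))).1 + 1) 0 := by
              have hp : j + (pvTakeRun (ds.getD j 0) (ds.drop (j+1))).1 = t ∨
                  j + (pvTakeRun (ds.getD j 0) (ds.drop (j+1))).1 = t + 1 ∨
                  j + (pvTakeRun (ds.getD j 0) (ds.drop (j+1))).1 = t + 2 := by omega
              rcases hp with h | h | h
              · rw [h]; exact w1
              · rw [h]; exact w2
              · rw [h]; exact w3
            have hxn := hrun (pvTakeRun (ds.getD j 0) (ds.drop (j+1))).1 le_rfl
            rcases hstop with h | h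
            · omega
            · exact h (hpad ▸ hxn)
        have hbd' : j + (pvTakeRun (ds.getD j 0) (ds.drop (j+1))).1 + 1 = 0 ∨
            ds.length ≤ j + (pvTakeRun (ds.getD j 0) (ds.drop (j+1))).1 + 1 ∨
            ds.getD (j + (pvTakeRun (ds.getD j 0) (ds.drop (j+1))).1 + 1 - 1) 0 ≠
              ds.getD (j + (pvTakeRun (ds.getD j 0) (ds.drop (j+1))).1 + 1) 0 := by
          rcases hstop with h | h
          · right; left; exact h
          · right; right
            rw [show j + (pvTakeRun (ds.getD j 0) (ds.drop (j+1))).1 + 1 - 1 =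
                j + (pvTakeRun (ds.getD j 0) (ds.drop (j+1))).1 by omega,
              hrun (pvTakeRun (ds.getD j 0) (ds.drop (j+1))).1 le_rfl]
            exact fun he => h he.symm
        have := ih (j + (pvTakeRun (ds.getD j 0) (ds.drop (j+1))).1 + 1) (by omega) hnw' hbd'
        rw [← hrest] at this
        exact this

-- bridges between B's column/difference lists and A's indexed accesses
theorem pvColB_getD (m : List (List Int)) (i k : Nat) :
    (pvColB m i).getD k 0 = pvAIdx m k i := by
  unfold pvColB pvAIdx
  by_cases hk : k < m.length
  · rw [List.getD_eq_getElem _ _ (by simpa using hk), List.getD_eq_getElem _ _ hk]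
    simp
  · have hk' : m.length ≤ k := by omega
    rw [List.getD_eq_default _ _ (by simpa using hk'), List.getD_eq_default _ _ hk']
    simp

theorem pvColB_len (m : List (List Int)) (i : Nat) : (pvColB m i).length = m.length := by
  simp [pvColB]

theorem pvDiffsB_len (col : List Int) : (pvDiffsB col).length = col.length - 1 := by
  simp [pvDiffsB]

theorem pvDiffsB_getD (col : List Int) (k : Nat) (hk : k < col.length - 1) :
    (pvDiffsB col).getD k 0 = col.getD k 0 - col.getD (k+1) 0 := by
  unfold pvDiffsB
  rw [List.getD_eq_getElem _ _ (by simpa using hk)]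
  simp

-- A's window predicate
def pvWA (m : List (List Int)) (i j : Nat) : Bool :=
  decide (pvAIdx m j i - pvAIdx m (j+1) i = pvAIdx m (j+1) i - pvAIdx m (j+2) i ∧
          pvAIdx m (j+1) i - pvAIdx m (j+2) i = pvAIdx m (j+2) i - pvAIdx m (j+3) i ∧
          pvAIdx m (j+2) i - pvAIdx m (j+3) i = pvAIdx m (j+3) i - pvAIdx m (j+4) i)

theorem pvAScanJ_eq_find (m : List (List Int)) (i : Nat) (l : List Nat) :
    pvAScanJ m i l = (l.find? (pvWA m i)).map (pvAOut m i) := by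
  induction l with
  | nil => rfl
  | cons j js ih =>
    simp only [pvAScanJ, List.find?_cons]
    by_cases h : pvWA m i j = true
    · have h' := of_decide_eq_true h
      simp [h, h'.1, h'.2.1, h'.2.2]
    · have h' := of_decide_eq_false (eq_false_of_ne_true h)
      simp [h', h, ih]

theorem pvOutB_eq (m : List (List Int)) (i j : Nat) :
    pvOutB m (pvColB m i) j = pvAOut m i j := by
  unfold pvOutB pvAOut
  apply List.map_congr_left
  intro s _
  rw [pvColB_getD]

theorem pvWin_eq_pvWA (m : List (List Int)) (i t : Nat) (ht : t + 3 < m.length - 1) :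
    pvWin (pvDiffsB (pvColB m i)) t = pvWA m i t := by
  have hlen : (pvColB m i).length - 1 = m.length - 1 := by rw [pvColB_len]
  have hget : ∀ k, k < m.length - 1 →
      (pvDiffsB (pvColB m i)).getD k 0 = pvAIdx m k i - pvAIdx m (k+1) i := by
    intro k hk
    rw [pvDiffsB_getD _ _ (by omega), pvColB_getD, pvColB_getD]
  unfold pvWin pvWA
  rw [hget t (by omega), hget (t+1) (by omega), hget (t+2) (by omega), hget (t+3) (by omega)]

theorem pvColEq (m : List (List Int)) (i : Nat) :
    pvAScanJ m i (List.range (m.length - 4)) =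
      (pvFindRun (pvDiffsB (pvColB m i)) 0).map (pvOutB m (pvColB m i)) := by
  set ds := pvDiffsB (pvColB m i) with hds
  have hlen : ds.length = m.length - 1 := by rw [hds, pvDiffsB_len, pvColB_len]
  have hmain := pvFindRun_find ds ds.length 0 (by omega)
    (fun t ht _ => absurd ht (by omega)) (Or.inl rfl)
  rw [List.drop_zero] at hmain
  rw [pvAScanJ_eq_find, hmain, List.range_eq_range']
  rw [show ds.length - 3 = m.length - 4 by omega]
  rw [pvFind_congr (pvWin ds) (pvWA m i) _ (by
    intro t htmem
    have ht : t < m.length - 4 := by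
      have := List.mem_range'.mp htmem
      omega
    exact pvWin_eq_pvWA m i t (by omega))]
  cases hfind : (List.range' 0 (m.length - 4)).find? (pvWA m i) with
  | none => rfl
  | some j => simp [pvOutB_eq]

theorem pvScanEq (m : List (List Int)) :
    ∀ (is : List Nat), pvAScanI m m.length is = pvColsB m is := by
  intro is
  induction is with
  | nil => rfl
  | cons i is ih =>
    simp only [pvAScanI, pvColsB, pvColEq m i]
    cases pvFindRun (pvDiffsB (pvColB m i)) 0 with
    | none => simpa using ih
    | some j => rfl

theorem v_check_1_eq (m : List (List Int)) : v_check_1 m = v_check_1_alt m := by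
  unfold v_check_1 v_check_1_alt
  by_cases h : m.length < 5
  · simp [h]
  · have hh : m.getD 0 [] = m.headD [] := by cases m <;> rfl
    simp only [if_neg h, pvScanEq, hh]

-- ===== VERDICT (by name: the statement is the Claim_ definition above) =====
theorem v_check_1_spec : Claim_equal_v_check_1 := by
  intro m _ _
  unfold Spec_v_check_1
  exact v_check_1_eq m
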